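-- pv_equiv track=rewrite | github.com/IBM/cp4waiops-samples | connector-scripts/instana_api_load_calculator.py | build_plugin_snapshotid_map
-- ===== SOURCE A (Python) =====
-- from collections import defaultdict
--
-- EXCLUDED_PLUGINS = {"application", "endpoint", "service"}
--
-- def build_plugin_snapshotid_map(node_array, metric_config, excluded_plugins=None):
--     plugin_map = defaultdict(list)
--     for entry in metric_config:
--         for plugin_name in entry:
--             if plugin_name not in EXCLUDED_PLUGINS:
--                 for node in node_array:
--                     if node.get("plugin") == plugin_name:
--                         snapshot_id = node.get("id")
--                         if snapshot_id:
--                             plugin_map[plugin_name].append(snapshot_id)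
--     return plugin_map
-- ===== SOURCE B (Python) =====
-- from collections import defaultdict, Counter
--
-- EXCLUDED_PLUGINS = {"application", "endpoint", "service"}
--
--
-- def build_plugin_snapshotid_map(node_array, metric_config, excluded_plugins=None):
--     # Index the nodes once (plugin -> ids), flatten the config into an
--     # occurrence list of kept plugin names, then emit each qualifying name's
--     # id block multiplied by its occurrence count.
--     index = defaultdict(list)
--     for node in node_array:
--         snapshot_id = node.get("id")
--         if snapshot_id:
--             index[node.get("plugin")].append(snapshot_id)
--     names = [name for entry in metric_config for name in entry
--              if name not in EXCLUDED_PLUGINS]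
--     counts = Counter(names)
--     plugin_map = {}
--     for name in names:
--         if name not in plugin_map and index[name]:
--             plugin_map[name] = index[name] * counts[name]
--     return plugin_map
-- ===== Notes on version B (the rewrite author's own statement) =====
-- stated objective: faster
-- what changed: B indexes node_array once, flattens the config into an occurrence list of kept plugin names, and for each name's first occurrence emits its id block times its Counter multiplicity, instead of A's rescans of node_array and repeated dict appends.
import Mathlib
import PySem

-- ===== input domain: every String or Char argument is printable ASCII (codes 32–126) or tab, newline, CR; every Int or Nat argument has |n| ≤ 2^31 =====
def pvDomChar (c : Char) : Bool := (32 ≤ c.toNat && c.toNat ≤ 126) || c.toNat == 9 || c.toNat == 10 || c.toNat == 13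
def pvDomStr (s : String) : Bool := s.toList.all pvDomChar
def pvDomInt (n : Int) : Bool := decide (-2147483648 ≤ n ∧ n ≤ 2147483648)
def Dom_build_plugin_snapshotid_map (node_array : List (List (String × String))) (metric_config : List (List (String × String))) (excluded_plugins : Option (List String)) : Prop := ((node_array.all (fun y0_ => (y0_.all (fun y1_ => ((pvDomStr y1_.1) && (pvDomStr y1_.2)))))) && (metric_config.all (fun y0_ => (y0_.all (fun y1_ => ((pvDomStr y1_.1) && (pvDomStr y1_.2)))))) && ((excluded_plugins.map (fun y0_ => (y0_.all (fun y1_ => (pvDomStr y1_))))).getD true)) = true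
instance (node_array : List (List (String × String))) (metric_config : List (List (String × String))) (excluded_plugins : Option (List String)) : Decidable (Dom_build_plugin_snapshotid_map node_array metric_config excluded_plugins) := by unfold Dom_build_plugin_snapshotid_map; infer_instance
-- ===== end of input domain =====

-- B indexes node_array once and emits each plugin name's id block times its occurrence count,
-- replacing A's per-name rescans of node_array and repeated dict appends (faster);
-- the excluded_plugins parameter is unused by A (it reads the module constant) and stays unused in B.

-- EXCLUDED_PLUGINS = {"application", "endpoint", "service"} — used only for membership tests
def pvEXCLUDED_PLUGINS : PySem.Set String := PySem.Set.ofList ["application", "endpoint", "service"]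

-- node.get(k) on a Python dict (nodes/entries arrive as insertion-ordered association lists)
def pvGet (node : List (String × String)) (k : String) : Option String :=
  (PySem.Dict.ofList node).get? k

-- ===== PORT A =====
-- body of A's innermost loop: one node, one plugin_name
def pvAStep (plugin_name : String) (pm : PySem.Dict String (List String))
    (node : List (String × String)) : PySem.Dict String (List String) :=
  if pvGet node "plugin" = some plugin_name then
    match pvGet node "id" with
    | some snapshot_id =>
        if snapshot_id ≠ "" then pm.modify plugin_name [] (· ++ [snapshot_id]) else pm
    | none => pm
  else pm

def build_plugin_snapshotid_map (node_array : List (List (String × String))) (metric_config : List (List (String × String))) (excluded_plugins : Option (List String)) : List (String × List String) :=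
  (metric_config.foldl (fun pm entry =>
      (PySem.Dict.ofList entry).keys.foldl (fun pm plugin_name =>
        if ¬ pvEXCLUDED_PLUGINS.contains plugin_name then
          node_array.foldl (pvAStep plugin_name) pm
        else pm) pm)
    PySem.Dict.empty).items

-- ===== PORT B =====
-- index-building loop: index[node.get("plugin")].append(snapshot_id) if snapshot_id truthy
-- (the index is keyed by node.get("plugin"), an Option String: a node without "plugin" files under None)
def pvIndexStep (idx : PySem.Dict (Option String) (List String))
    (node : List (String × String)) : PySem.Dict (Option String) (List String) :=
  match pvGet node "id" with
  | some snapshot_id =>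
      if snapshot_id ≠ "" then idx.modify (pvGet node "plugin") [] (· ++ [snapshot_id]) else idx
  | none => idx

def pvIndex (node_array : List (List (String × String))) : PySem.Dict (Option String) (List String) :=
  node_array.foldl pvIndexStep PySem.Dict.empty

-- names = [name for entry in metric_config for name in entry if name not in EXCLUDED_PLUGINS]
def pvNames (metric_config : List (List (String × String))) : List String :=
  metric_config.flatMap (fun entry =>
    (PySem.Dict.ofList entry).keys.filter (fun name => !pvEXCLUDED_PLUGINS.contains name))

def build_plugin_snapshotid_map_alt (node_array : List (List (String × String))) (metric_config : List (List (String × String))) (excluded_plugins : Option (List String)) : List (String × List String) :=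
  let index := pvIndex node_array
  let names := pvNames metric_config
  let counts := PySem.Dict.counter names          -- Counter(names)
  (names.foldl (fun plugin_map name =>
      if ¬ plugin_map.contains name ∧ index.getD (some name) [] ≠ [] then
        -- plugin_map[name] = index[name] * counts[name]
        plugin_map.insert name (PySem.List.pyRepeat (index.getD (some name) []) (counts.getD name 0))
      else plugin_map)
    PySem.Dict.empty).items

-- ===== PRECONDITION & SPEC =====
def Spec_build_plugin_snapshotid_map (node_array : List (List (String × String))) (metric_config : List (List (String × String))) (excluded_plugins : Option (List String)) (out : List (String × List String)) : Prop := out = build_plugin_snapshotid_map_alt node_array metric_config excluded_plugins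
instance (node_array : List (List (String × String))) (metric_config : List (List (String × String))) (excluded_plugins : Option (List String)) (out : List (String × List String)) : Decidable (Spec_build_plugin_snapshotid_map node_array metric_config excluded_plugins out) := by unfold Spec_build_plugin_snapshotid_map; infer_instance

-- ===== CLAIM (what is proved, stated in full; the proofs are below) =====
def Claim_equal_build_plugin_snapshotid_map : Prop := ∀ (node_array : List (List (String × String))) (metric_config : List (List (String × String))) (excluded_plugins : Option (List String)), Dom_build_plugin_snapshotid_map node_array metric_config excluded_plugins → Spec_build_plugin_snapshotid_map node_array metric_config excluded_plugins (build_plugin_snapshotid_map node_array metric_config excluded_plugins)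

-- ===== LEMMAS AND PROOFS =====

-- the ids collected for a plugin key (Option String: B's index key), in node_array order
def pvCollectO (node_array : List (List (String × String))) (k : Option String) : List String :=
  node_array.filterMap (fun node =>
    match pvGet node "id" with
    | some sid => if pvGet node "plugin" = k ∧ sid ≠ "" then some sid else none
    | none => none)

-- the ids collected for plugin name pn
def pvCollect (node_array : List (List (String × String))) (pn : String) : List String :=
  pvCollectO node_array (some pn)

-- the common normal form of both results: qualifying first occurrences of the prefix `pre`
-- paired with their repeated id blocks (counts taken over `names`)
def pvCanonPre (node_array : List (List (String × String))) (names pre : List String) :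
    List (String × List String) :=
  ((PySem.Set.ofList pre).filter (fun n => !decide (pvCollect node_array n = []))).map
    (fun n => (n, PySem.List.pyRepeat (pvCollect node_array n) ((names.count n : Nat) : Int)))

lemma modify_modify_append {pm : PySem.Dict String (List String)} {pn : String}
    (xs ys : List String) :
    (pm.modify pn [] (· ++ xs)).modify pn [] (· ++ ys)
      = pm.modify pn [] (· ++ (xs ++ ys)) := by
  simp [PySem.Dict.modify, PySem.Dict.insert_insert_self, PySem.Dict.getD_insert_self]

-- A's inner scan of node_array is one conditional modify by the collected block
lemma A_inner_eq (pn : String) :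
    ∀ (na : List (List (String × String))) (pm : PySem.Dict String (List String)),
      na.foldl (pvAStep pn) pm
        = if pvCollect na pn = [] then pm
          else pm.modify pn [] (· ++ pvCollect na pn) := by
  intro na
  induction na with
  | nil => intro pm; simp [pvCollect, pvCollectO]
  | cons node rest ih =>
    intro pm
    rw [List.foldl_cons, ih]
    cases hid : pvGet node "id" with
    | none =>
      have hc : pvCollect (node :: rest) pn = pvCollect rest pn := by
        simp [pvCollect, pvCollectO, hid]
      have hstep : pvAStep pn pm node = pm := by
        simp [pvAStep, hid]
      rw [hc, hstep]
    | some sid =>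
      by_cases hp : pvGet node "plugin" = some pn
      · by_cases hs : sid = ""
        · have hc : pvCollect (node :: rest) pn = pvCollect rest pn := by
            simp [pvCollect, pvCollectO, hid, hs]
          have hstep : pvAStep pn pm node = pm := by
            simp [pvAStep, hid, hp, hs]
          rw [hc, hstep]
        · have hc : pvCollect (node :: rest) pn = sid :: pvCollect rest pn := by
            simp [pvCollect, pvCollectO, hid, hp, hs]
          have hstep : pvAStep pn pm node = pm.modify pn [] (· ++ [sid]) := by
            simp [pvAStep, hid, hp, hs]
          rw [hc, hstep]
          by_cases hr : pvCollect rest pn = []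
          · simp [hr]
          · rw [if_neg hr, if_neg (by simp), modify_modify_append]
            simp
      · have hc : pvCollect (node :: rest) pn = pvCollect rest pn := by
          simp [pvCollect, pvCollectO, hid, hp]
        have hstep : pvAStep pn pm node = pm := by
          simp [pvAStep, hp]
        rw [hc, hstep]

lemma index_getD_aux :
    ∀ (na : List (List (String × String))) (idx : PySem.Dict (Option String) (List String))
      (k : Option String),
      (na.foldl pvIndexStep idx).getD k [] = idx.getD k [] ++ pvCollectO na k := by
  intro na
  induction na with
  | nil => intro idx k; simp [pvCollectO]
  | cons node rest ih =>
    intro idx k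
    rw [List.foldl_cons, ih]
    cases hid : pvGet node "id" with
    | none =>
      have hc : pvCollectO (node :: rest) k = pvCollectO rest k := by
        simp [pvCollectO, hid]
      have hstep : pvIndexStep idx node = idx := by
        simp [pvIndexStep, hid]
      rw [hc, hstep]
    | some sid =>
      by_cases hs : sid = ""
      · have hc : pvCollectO (node :: rest) k = pvCollectO rest k := by
          simp [pvCollectO, hid, hs]
        have hstep : pvIndexStep idx node = idx := by
          simp [pvIndexStep, hid, hs]
        rw [hc, hstep]
      · have hstep : pvIndexStep idx node
            = idx.modify (pvGet node "plugin") [] (· ++ [sid]) := by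
          simp [pvIndexStep, hid, hs]
        rw [hstep]
        by_cases hpk : pvGet node "plugin" = k
        · have hc : pvCollectO (node :: rest) k = sid :: pvCollectO rest k := by
            simp [pvCollectO, hid, hpk, hs]
          rw [hc, hpk, PySem.Dict.getD_modify_self, List.append_assoc]
          rfl
        · have hc : pvCollectO (node :: rest) k = pvCollectO rest k := by
            simp [pvCollectO, hid, hpk]
          rw [hc, PySem.Dict.getD_modify_of_ne (hne := fun h => hpk h.symm)]

-- the index's entry at `some n` is exactly the collected block
lemma index_getD (na : List (List (String × String))) (n : String) :
    (pvIndex na).getD (some n) [] = pvCollect na n := by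
  rw [pvIndex, index_getD_aux]
  simp [pvCollect, PySem.Dict.getD_empty]

-- getD of a grouping fold: each occurrence of k appends the block g k
lemma getD_foldl_modify_block (g : String → List String) :
    ∀ (l : List String) (d : PySem.Dict String (List String)) (k : String),
      (l.foldl (fun d x => d.modify x [] (· ++ g x)) d).getD k []
        = d.getD k [] ++ PySem.List.pyRepeat (g k) ((l.count k : Nat) : Int) := by
  intro l
  induction l with
  | nil => intro d k; simp [PySem.List.pyRepeat]
  | cons x rest ih =>
    intro d k
    rw [List.foldl_cons, ih]
    by_cases hk : k = x
    · subst hk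
      rw [PySem.Dict.getD_modify_self, List.count_cons_self, List.append_assoc]
      simp [PySem.List.pyRepeat, List.replicate_succ]
    · rw [PySem.Dict.getD_modify_of_ne (hne := hk),
        List.count_cons_of_ne (fun h => hk h.symm)]

lemma ofList_append_singleton (l : List String) (x : String) :
    PySem.Set.ofList (l ++ [x]) = PySem.Set.add (PySem.Set.ofList l) x := by
  simp [PySem.Set.ofList, List.foldl_append]

-- Set.ofList commutes with filter
lemma ofList_filter (p : String → Bool) :
    ∀ (l : List String), PySem.Set.ofList (l.filter p) = (PySem.Set.ofList l).filter p := by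
  intro l
  induction l using List.reverseRecOn with
  | nil => rfl
  | append_singleton l x ih =>
    rw [List.filter_append, ofList_append_singleton]
    cases hx : p x with
    | false =>
      have h0 : (l.filter p) ++ [x].filter p = l.filter p := by simp [hx]
      rw [h0, ih, PySem.Set.add]
      by_cases hc : (PySem.Set.ofList l).contains x = true
      · rw [if_pos hc]
      · rw [if_neg hc, List.filter_append]
        simp [hx]
    | true =>
      have h0 : (l.filter p) ++ [x].filter p = l.filter p ++ [x] := by simp [hx]
      rw [h0, ofList_append_singleton, ih, PySem.Set.add, PySem.Set.add]
      simp only [PySem.Set.contains]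
      have hmem : (List.filter p (PySem.Set.ofList l)).contains x
          = List.contains (PySem.Set.ofList l) x := by
        simp [List.mem_filter, hx]
      simp only [hmem]
      by_cases hc : List.contains (PySem.Set.ofList l) x = true
      · rw [if_pos hc, if_pos hc]
      · rw [if_neg hc, if_neg hc, List.filter_append]
        simp [hx]

-- A's result equals the canonical form
lemma A_items_eq (na : List (List (String × String))) (mc : List (List (String × String)))
    (ex : Option (List String)) :
    build_plugin_snapshotid_map na mc ex = pvCanonPre na (pvNames mc) (pvNames mc) := by
  unfold build_plugin_snapshotid_map
  have h1 : ∀ (pm : PySem.Dict String (List String)) (entry : List (String × String)),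
      (PySem.Dict.ofList entry).keys.foldl (fun pm plugin_name =>
        if ¬ pvEXCLUDED_PLUGINS.contains plugin_name then
          na.foldl (pvAStep plugin_name) pm
        else pm) pm
      = ((PySem.Dict.ofList entry).keys.filter
          (fun name => !pvEXCLUDED_PLUGINS.contains name)).foldl
          (fun pm n => na.foldl (pvAStep n) pm) pm := by
    intro pm entry
    rw [PySem.List.foldl_ite_eq_foldl_filter
      (p := fun n => ¬ pvEXCLUDED_PLUGINS.contains n = true)]
    congr 1
    simp [decide_not]
  simp only [h1]
  rw [← List.foldl_flatMap]
  show ((pvNames mc).foldl (fun pm n => na.foldl (pvAStep n) pm) PySem.Dict.empty).items = _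
  have h2 : (pvNames mc).foldl (fun pm n => na.foldl (pvAStep n) pm) PySem.Dict.empty
      = (pvNames mc).foldl (fun pm n =>
          if ¬ pvCollect na n = [] then pm.modify n [] (· ++ pvCollect na n) else pm)
          PySem.Dict.empty := by
    apply PySem.List.foldl_congr_mem
    intro pm n _
    rw [A_inner_eq n na pm]
    exact (ite_not (pvCollect na n = []) _ _).symm
  rw [h2, PySem.List.foldl_ite_eq_foldl_filter (p := fun n => ¬ pvCollect na n = [])]
  have hfil : ((pvNames mc).filter (fun n => decide ¬ pvCollect na n = []))
      = (pvNames mc).filter (fun n => !decide (pvCollect na n = [])) := by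
    simp [decide_not]
  rw [hfil]
  have hkeys : (((pvNames mc).filter (fun n => !decide (pvCollect na n = []))).foldl
        (fun pm n => pm.modify n [] (· ++ pvCollect na n)) PySem.Dict.empty).keys
      = PySem.Set.ofList ((pvNames mc).filter (fun n => !decide (pvCollect na n = []))) := by
    rw [PySem.Dict.keys_foldl_modify
      (l := (pvNames mc).filter (fun n => !decide (pvCollect na n = [])))
      (d0 := ([] : List String)) (f := fun _ x => (· ++ pvCollect na x))]
    rfl
  have hnd : (((pvNames mc).filter (fun n => !decide (pvCollect na n = []))).foldl
        (fun pm n => pm.modify n [] (· ++ pvCollect na n)) PySem.Dict.empty).keys.Nodup := by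
    rw [hkeys]; exact PySem.Set.nodup_ofList _
  rw [PySem.Dict.items_eq_map_keys _ hnd [], hkeys]
  rw [show PySem.Set.ofList ((pvNames mc).filter (fun n => !decide (pvCollect na n = [])))
      = (PySem.Set.ofList (pvNames mc)).filter (fun n => !decide (pvCollect na n = []))
      from ofList_filter _ (pvNames mc)]
  unfold pvCanonPre
  apply List.map_congr_left
  intro k hk
  have hCk : pvCollect na k ≠ [] := by
    have := (List.mem_filter.mp hk).2
    simpa using this
  rw [getD_foldl_modify_block (fun n => pvCollect na n), PySem.Dict.getD_empty,
    List.count_filter (by simpa using hCk)]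
  simp

-- snoc lemmas for the canonical form
lemma canon_snoc_dead (na : List (List (String × String))) (names pre : List String)
    (n : String) (hC : pvCollect na n = []) :
    pvCanonPre na names (pre ++ [n]) = pvCanonPre na names pre := by
  unfold pvCanonPre
  rw [ofList_append_singleton, PySem.Set.add]
  by_cases hc : (PySem.Set.ofList pre).contains n = true
  · rw [if_pos hc]
  · rw [if_neg hc, List.filter_append]
    simp [hC]

lemma canon_snoc_mem (na : List (List (String × String))) (names pre : List String)
    (n : String) (hmem : n ∈ pre) :
    pvCanonPre na names (pre ++ [n]) = pvCanonPre na names pre := by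
  unfold pvCanonPre
  have hc : (PySem.Set.ofList pre).contains n = true := by
    simp [PySem.Set.contains, PySem.Set.mem_ofList, hmem]
  rw [ofList_append_singleton, PySem.Set.add, if_pos hc]

lemma canon_snoc_new (na : List (List (String × String))) (names pre : List String)
    (n : String) (hmem : n ∉ pre) (hC : pvCollect na n ≠ []) :
    pvCanonPre na names (pre ++ [n])
      = pvCanonPre na names pre
        ++ [(n, PySem.List.pyRepeat (pvCollect na n) ((names.count n : Nat) : Int))] := by
  unfold pvCanonPre
  have hc : (PySem.Set.ofList pre).contains n = false := by
    simp [PySem.Set.contains, PySem.Set.mem_ofList, hmem]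
  rw [ofList_append_singleton, PySem.Set.add, hc]
  simp [List.filter_append, hC]

-- B's loop, stepwise: processing one more name extends the canonical prefix
lemma B_go (na : List (List (String × String))) (names : List String) :
    ∀ (rest pre : List String),
      (rest.foldl (fun pm n =>
          if ¬ pm.contains n = true ∧ pvCollect na n ≠ [] then
            pm.insert n (PySem.List.pyRepeat (pvCollect na n) ((names.count n : Nat) : Int))
          else pm)
        (PySem.Dict.mk (pvCanonPre na names pre)))
      = PySem.Dict.mk (pvCanonPre na names (pre ++ rest)) := by
  intro rest
  induction rest with
  | nil => intro pre; simp
  | cons n rest ih =>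
    intro pre
    rw [List.foldl_cons]
    have hcont : (PySem.Dict.mk (pvCanonPre na names pre)).contains n = true
        ↔ (n ∈ pre ∧ pvCollect na n ≠ []) := by
      rw [PySem.Dict.contains_mk]
      unfold pvCanonPre
      simp [List.any_map, List.any_eq_true, PySem.Set.mem_ofList,
        Function.comp]
    have hstep : (if ¬ (PySem.Dict.mk (pvCanonPre na names pre)).contains n = true
            ∧ pvCollect na n ≠ [] then
          (PySem.Dict.mk (pvCanonPre na names pre)).insert n
            (PySem.List.pyRepeat (pvCollect na n) ((names.count n : Nat) : Int))
        else PySem.Dict.mk (pvCanonPre na names pre))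
        = PySem.Dict.mk (pvCanonPre na names (pre ++ [n])) := by
      by_cases hC : pvCollect na n = []
      · rw [if_neg (fun h => h.2 hC), canon_snoc_dead na names pre n hC]
      · by_cases hmem : n ∈ pre
        · rw [if_neg (fun h => h.1 (hcont.mpr ⟨hmem, hC⟩)),
            canon_snoc_mem na names pre n hmem]
        · have hcf : (PySem.Dict.mk (pvCanonPre na names pre)).contains n = false := by
            rcases Bool.eq_false_or_eq_true
              ((PySem.Dict.mk (pvCanonPre na names pre)).contains n) with h | h
            · exact absurd (hcont.mp h).1 hmem
            · exact h
          rw [if_pos ⟨by simp [hcf], hC⟩]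
          apply PySem.Dict.ext
          rw [PySem.Dict.items_insert_of_not_contains _ _ hcf]
          show pvCanonPre na names pre ++ _ = pvCanonPre na names (pre ++ [n])
          rw [canon_snoc_new na names pre n hmem hC]
      
    rw [hstep, ih (pre ++ [n])]
    rw [show pre ++ n :: rest = (pre ++ [n]) ++ rest by simp]

lemma B_items_eq (na : List (List (String × String))) (mc : List (List (String × String)))
    (ex : Option (List String)) :
    build_plugin_snapshotid_map_alt na mc ex = pvCanonPre na (pvNames mc) (pvNames mc) := by
  unfold build_plugin_snapshotid_map_alt
  show (((pvNames mc)).foldl (fun plugin_map name =>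
      if ¬ plugin_map.contains name = true ∧ (pvIndex na).getD (some name) [] ≠ [] then
        plugin_map.insert name (PySem.List.pyRepeat ((pvIndex na).getD (some name) [])
          ((PySem.Dict.counter (pvNames mc)).getD name 0))
      else plugin_map)
    PySem.Dict.empty).items = _
  have hbody : ((pvNames mc)).foldl (fun plugin_map name =>
      if ¬ plugin_map.contains name = true ∧ (pvIndex na).getD (some name) [] ≠ [] then
        plugin_map.insert name (PySem.List.pyRepeat ((pvIndex na).getD (some name) [])
          ((PySem.Dict.counter (pvNames mc)).getD name 0))
      else plugin_map) PySem.Dict.empty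
      = ((pvNames mc)).foldl (fun pm n =>
      if ¬ pm.contains n = true ∧ pvCollect na n ≠ [] then
        pm.insert n (PySem.List.pyRepeat (pvCollect na n) (((pvNames mc).count n : Nat) : Int))
      else pm) PySem.Dict.empty := by
    apply PySem.List.foldl_congr_mem
    intro pm n _
    rw [index_getD, PySem.Dict.getD_counter]
  rw [hbody]
  rw [show (PySem.Dict.empty : PySem.Dict String (List String))
      = PySem.Dict.mk (pvCanonPre na (pvNames mc) []) from rfl]
  rw [B_go na (pvNames mc) (pvNames mc) []]
  rfl

-- ===== VERDICT (by name: the statement is the Claim_ definition above) =====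
theorem build_plugin_snapshotid_map_spec : Claim_equal_build_plugin_snapshotid_map := by
  intro node_array metric_config excluded_plugins _
  unfold Spec_build_plugin_snapshotid_map
  rw [A_items_eq node_array metric_config excluded_plugins,
    B_items_eq node_array metric_config excluded_plugins]
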